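-- pv_equiv track=rewrite | github.com/StefanoDGM/Lettura_Bollette | src/pipeline/process_bolletta.py | document_has_cross_period_context
-- ===== SOURCE A (Python) =====
-- FLAG_TRUE_VALUES = {"si", "sì", "yes", "true", "1"}
--
-- def collect_document_periods(rows: list[dict]) -> set[tuple[str, str]]:
--     periods = set()
--     for row in rows:
--         data_inizio = str(row.get("data_inizio", "")).strip()
--         data_fine = str(row.get("data_fine", "")).strip()
--         if data_inizio or data_fine:
--             periods.add((data_inizio, data_fine))
--     return periods
--
-- def normalize_si_no_flag(value, default: str = "") -> str:
--     text = str(value or "").strip().lower()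
--     if not text:
--         return default
--     return "si" if text in FLAG_TRUE_VALUES else "no"
--
-- def document_has_cross_period_context(rows: list[dict]) -> bool:
--     if len(collect_document_periods(rows)) > 1:
--         return True
--     for row in rows:
--         if normalize_si_no_flag(row.get("presenza_ricalcolo")) == "si":
--             return True
--         if str(row.get("riferimento_ricalcolo_da", "")).strip() or str(row.get("riferimento_ricalcolo_a", "")).strip():
--             return True
--     return False
-- ===== SOURCE B (Python) =====
-- FLAG_TRUE_VALUES = {"si", "sì", "yes", "true", "1"}
--
-- def document_has_cross_period_context(rows: list[dict]) -> bool: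
--     first_period = None
--     for row in rows:
--         if str(row.get("presenza_ricalcolo") or "").strip().lower() in FLAG_TRUE_VALUES:
--             return True
--         if str(row.get("riferimento_ricalcolo_da", "")).strip() or str(row.get("riferimento_ricalcolo_a", "")).strip():
--             return True
--         data_inizio = str(row.get("data_inizio", "")).strip()
--         data_fine = str(row.get("data_fine", "")).strip()
--         if data_inizio or data_fine:
--             period = (data_inizio, data_fine)
--             if first_period is None:
--                 first_period = period
--             elif period != first_period:
--                 return True
--     return False
-- ===== Notes on version B (the rewrite author's own statement) =====
-- stated objective: simpler
-- what changed: Replaces A's two-pass structure (build a set of periods, then rescan for recalculation flags) by one early-exit pass that keeps only the first non-empty period seen and returns True at the first differing period or set recalculation flag, with the helpers inlined.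
import Mathlib
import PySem

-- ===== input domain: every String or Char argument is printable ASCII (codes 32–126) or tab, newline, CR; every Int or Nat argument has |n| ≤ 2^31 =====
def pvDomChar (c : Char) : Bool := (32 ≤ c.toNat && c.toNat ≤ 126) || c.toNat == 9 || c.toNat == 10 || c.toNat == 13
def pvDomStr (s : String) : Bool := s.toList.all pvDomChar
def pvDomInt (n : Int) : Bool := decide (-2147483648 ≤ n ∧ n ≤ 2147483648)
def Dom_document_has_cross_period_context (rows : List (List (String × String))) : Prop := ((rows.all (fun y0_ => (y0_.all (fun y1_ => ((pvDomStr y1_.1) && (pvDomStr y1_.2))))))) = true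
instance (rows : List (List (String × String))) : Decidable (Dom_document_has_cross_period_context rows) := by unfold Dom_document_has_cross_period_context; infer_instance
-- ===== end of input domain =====

-- B fuses A's two passes (set of periods, then flag scan) into one early-exit pass
-- keeping only the first non-empty period; return value equivalence is proved below.

-- ===== PORT A =====
def FLAG_TRUE_VALUES : PySem.Set String := PySem.Set.ofList ["si", "sì", "yes", "true", "1"]

-- one step of collect_document_periods' loop body (named so the lemmas can refer to it)
def pvPeriodStep (periods : PySem.Set (String × String)) (row : List (String × String)) :
    PySem.Set (String × String) :=
  let data_inizio := PySem.Str.strip (PySem.Dict.getD ⟨row⟩ "data_inizio" "")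
  let data_fine := PySem.Str.strip (PySem.Dict.getD ⟨row⟩ "data_fine" "")
  if data_inizio ≠ "" ∨ data_fine ≠ "" then PySem.Set.add periods (data_inizio, data_fine)
  else periods

def collect_document_periods (rows : List (List (String × String))) : PySem.Set (String × String) :=
  rows.foldl pvPeriodStep PySem.Set.empty

def normalize_si_no_flag (value : Option String) (default : String) : String :=
  -- str(value or "") : None and "" both give "" — exactly Option.getD ""
  let text := PySem.Str.lower (PySem.Str.strip (value.getD ""))
  if text = "" then default
  else if PySem.Set.contains FLAG_TRUE_VALUES text then "si" else "no"

-- A's flag loop with early return, as structural recursion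
def pvFlagLoopA : List (List (String × String)) → Bool
  | [] => false
  | row :: rest =>
    if normalize_si_no_flag (PySem.Dict.get? ⟨row⟩ "presenza_ricalcolo") "" = "si" then true
    else if PySem.Str.strip (PySem.Dict.getD ⟨row⟩ "riferimento_ricalcolo_da" "") ≠ "" ∨
            PySem.Str.strip (PySem.Dict.getD ⟨row⟩ "riferimento_ricalcolo_a" "") ≠ "" then true
    else pvFlagLoopA rest

def document_has_cross_period_context (rows : List (List (String × String))) : Bool :=
  if 1 < PySem.Set.len (collect_document_periods rows) then true
  else pvFlagLoopA rows

-- ===== PORT B =====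
-- single pass carrying first_period : Option (String × String)
def pvGoB (fp : Option (String × String)) : List (List (String × String)) → Bool
  | [] => false
  | row :: rest =>
    if PySem.Set.contains FLAG_TRUE_VALUES
        (PySem.Str.lower (PySem.Str.strip ((PySem.Dict.get? ⟨row⟩ "presenza_ricalcolo").getD ""))) then true
    else if PySem.Str.strip (PySem.Dict.getD ⟨row⟩ "riferimento_ricalcolo_da" "") ≠ "" ∨
            PySem.Str.strip (PySem.Dict.getD ⟨row⟩ "riferimento_ricalcolo_a" "") ≠ "" then true
    else
      let data_inizio := PySem.Str.strip (PySem.Dict.getD ⟨row⟩ "data_inizio" "")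
      let data_fine := PySem.Str.strip (PySem.Dict.getD ⟨row⟩ "data_fine" "")
      if data_inizio ≠ "" ∨ data_fine ≠ "" then
        match fp with
        | none => pvGoB (some (data_inizio, data_fine)) rest
        | some p => if (data_inizio, data_fine) ≠ p then true else pvGoB fp rest
      else pvGoB fp rest

def document_has_cross_period_context_alt (rows : List (List (String × String))) : Bool :=
  pvGoB none rows

-- ===== PRECONDITION & SPEC =====
def Spec_document_has_cross_period_context (rows : List (List (String × String))) (out : Bool) : Prop := out = document_has_cross_period_context_alt rows
instance (rows : List (List (String × String))) (out : Bool) : Decidable (Spec_document_has_cross_period_context rows out) := by unfold Spec_document_has_cross_period_context; infer_instance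

-- ===== CLAIM (what is proved, stated in full; the proofs are below) =====
def Claim_equal_document_has_cross_period_context : Prop := ∀ (rows : List (List (String × String))), Dom_document_has_cross_period_context rows → Spec_document_has_cross_period_context rows (document_has_cross_period_context rows)

-- ===== LEMMAS AND PROOFS =====

-- the initial set matching a stored first_period
def pvInitSet : Option (String × String) → PySem.Set (String × String)
  | none => PySem.Set.empty
  | some p => PySem.Set.add PySem.Set.empty p

theorem pvSet_add_length_ge {α : Type} [BEq α] (s : PySem.Set α) (x : α) :
    s.length ≤ (PySem.Set.add s x).length := by
  simp only [PySem.Set.add]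
  split_ifs <;> simp

theorem pvFold_length_ge (rows : List (List (String × String)))
    (s : PySem.Set (String × String)) :
    s.length ≤ (rows.foldl pvPeriodStep s).length := by
  induction rows generalizing s with
  | nil => simp
  | cons r rest ih =>
    refine le_trans ?_ (ih (pvPeriodStep s r))
    simp only [pvPeriodStep]
    split_ifs with h
    · exact pvSet_add_length_ge s _
    · exact le_rfl

theorem pvFlag_eq (v : Option String) :
    (decide (normalize_si_no_flag v "" = "si")) =
      PySem.Set.contains FLAG_TRUE_VALUES (PySem.Str.lower (PySem.Str.strip (v.getD ""))) := by
  simp only [normalize_si_no_flag]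
  split_ifs with h1 h2
  · rw [h1]; decide
  · rw [h2]; decide
  · simp only [Bool.not_eq_true] at h2
    rw [h2]; decide

set_option maxHeartbeats 4000000 in
theorem pvGoB_eq (rows : List (List (String × String))) (fp : Option (String × String)) :
    pvGoB fp rows =
      ((decide (1 < PySem.Set.len (rows.foldl pvPeriodStep (pvInitSet fp)))) || pvFlagLoopA rows) := by
  induction rows generalizing fp with
  | nil =>
    cases fp <;>
      simp [pvGoB, pvFlagLoopA, pvInitSet, PySem.Set.len, PySem.Set.empty, PySem.Set.add,
        PySem.Set.contains]
  | cons row rest ih =>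
    have hC1 : PySem.Set.contains FLAG_TRUE_VALUES
        (PySem.Str.lower (PySem.Str.strip ((PySem.Dict.get? ⟨row⟩ "presenza_ricalcolo").getD ""))) =
        decide (normalize_si_no_flag (PySem.Dict.get? ⟨row⟩ "presenza_ricalcolo") "" = "si") :=
      (pvFlag_eq _).symm
    cases fp with
    | none =>
      simp only [pvGoB, pvFlagLoopA, List.foldl_cons]
      rw [hC1]
      rcases Classical.em (normalize_si_no_flag (PySem.Dict.get? ⟨row⟩ "presenza_ricalcolo") "" = "si")
        with h1 | h1
      · rw [decide_eq_true h1, if_pos h1]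
        simp
      · rw [decide_eq_false h1, if_neg h1]
        simp only [Bool.false_eq_true, if_false]
        rcases Classical.em (PySem.Str.strip (PySem.Dict.getD ⟨row⟩ "riferimento_ricalcolo_da" "") ≠ "" ∨
            PySem.Str.strip (PySem.Dict.getD ⟨row⟩ "riferimento_ricalcolo_a" "") ≠ "") with h2 | h2
        · rw [if_pos h2, if_pos h2]
          simp
        · rw [if_neg h2, if_neg h2]
          rcases Classical.em (PySem.Str.strip (PySem.Dict.getD ⟨row⟩ "data_inizio" "") ≠ "" ∨
              PySem.Str.strip (PySem.Dict.getD ⟨row⟩ "data_fine" "") ≠ "") with h3 | h3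
          · have hstep : pvPeriodStep (pvInitSet none) row =
                pvInitSet (some (PySem.Str.strip (PySem.Dict.getD ⟨row⟩ "data_inizio" ""),
                  PySem.Str.strip (PySem.Dict.getD ⟨row⟩ "data_fine" ""))) := by
              simp only [pvPeriodStep]
              rw [if_pos h3]
              rfl
            rw [if_pos h3, ih]
            simp only [hstep]
          · have hstep : pvPeriodStep (pvInitSet none) row = pvInitSet none := by
              simp only [pvPeriodStep]
              rw [if_neg h3]
            rw [if_neg h3, ih]
            simp only [hstep]
    | some p =>
      simp only [pvGoB, pvFlagLoopA, List.foldl_cons]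
      rw [hC1]
      rcases Classical.em (normalize_si_no_flag (PySem.Dict.get? ⟨row⟩ "presenza_ricalcolo") "" = "si")
        with h1 | h1
      · rw [decide_eq_true h1, if_pos h1]
        simp
      · rw [decide_eq_false h1, if_neg h1]
        simp only [Bool.false_eq_true, if_false]
        rcases Classical.em (PySem.Str.strip (PySem.Dict.getD ⟨row⟩ "riferimento_ricalcolo_da" "") ≠ "" ∨
            PySem.Str.strip (PySem.Dict.getD ⟨row⟩ "riferimento_ricalcolo_a" "") ≠ "") with h2 | h2
        · rw [if_pos h2, if_pos h2]
          simp
        · rw [if_neg h2, if_neg h2]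
          rcases Classical.em (PySem.Str.strip (PySem.Dict.getD ⟨row⟩ "data_inizio" "") ≠ "" ∨
              PySem.Str.strip (PySem.Dict.getD ⟨row⟩ "data_fine" "") ≠ "") with h3 | h3
          · rw [if_pos h3]
            rcases Classical.em ((PySem.Str.strip (PySem.Dict.getD ⟨row⟩ "data_inizio" ""),
                PySem.Str.strip (PySem.Dict.getD ⟨row⟩ "data_fine" "")) = p) with heq | hne
            · have hmem : PySem.Set.contains (pvInitSet (some p))
                  (PySem.Str.strip (PySem.Dict.getD ⟨row⟩ "data_inizio" ""),
                   PySem.Str.strip (PySem.Dict.getD ⟨row⟩ "data_fine" "")) = true := by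
                rw [heq]
                simp [pvInitSet, PySem.Set.add, PySem.Set.empty, PySem.Set.contains]
              have hstep : pvPeriodStep (pvInitSet (some p)) row = pvInitSet (some p) := by
                simp only [pvPeriodStep]
                rw [if_pos h3]
                simp only [PySem.Set.add, hmem, if_true]
              rw [if_neg (not_not_intro heq), ih]
              simp only [hstep]
            · rw [if_pos hne]
              have hmem : PySem.Set.contains (pvInitSet (some p))
                  (PySem.Str.strip (PySem.Dict.getD ⟨row⟩ "data_inizio" ""),
                   PySem.Str.strip (PySem.Dict.getD ⟨row⟩ "data_fine" "")) = false := by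
                simp [pvInitSet, PySem.Set.add, PySem.Set.empty, PySem.Set.contains]
                intro h; exact hne h
              have h2len : 2 ≤ (pvPeriodStep (pvInitSet (some p)) row).length := by
                simp only [pvPeriodStep]
                rw [if_pos h3]
                simp [PySem.Set.add, pvInitSet, PySem.Set.empty, PySem.Set.contains]
                rw [if_neg hne]
                simp
              have hmono := pvFold_length_ge rest (pvPeriodStep (pvInitSet (some p)) row)
              have hlen : 1 < PySem.Set.len
                  (rest.foldl pvPeriodStep (pvPeriodStep (pvInitSet (some p)) row)) := by
                simp only [PySem.Set.len]
                omega
              simp only [PySem.Set.len] at hlen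
              simp
              exact Or.inl (by omega)
          · have hstep : pvPeriodStep (pvInitSet (some p)) row = pvInitSet (some p) := by
              simp only [pvPeriodStep]
              rw [if_neg h3]
            rw [if_neg h3, ih]
            simp only [hstep]

-- ===== VERDICT (by name: the statement is the Claim_ definition above) =====
theorem document_has_cross_period_context_spec : Claim_equal_document_has_cross_period_context := by
  intro rows _
  unfold Spec_document_has_cross_period_context
  unfold document_has_cross_period_context document_has_cross_period_context_alt
  rw [pvGoB_eq rows none]
  split_ifs with h
  · have hd : decide (1 < PySem.Set.len (List.foldl pvPeriodStep (pvInitSet none) rows)) = true :=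
      decide_eq_true h
    rw [hd]; simp
  · have hd : decide (1 < PySem.Set.len (List.foldl pvPeriodStep (pvInitSet none) rows)) = false :=
      decide_eq_false h
    rw [hd]; simp
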